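-- pv_equiv track=rewrite | github.com/samuel-jinadu/python-scripts | display_inventory.py | addToInventory
-- ===== SOURCE A (Python) =====
-- def addToInventory(inventory, items):
--     for item in items:
--         if item in inventory.keys():
--             inventory[item] += 1
--         else:
--             inventory.setdefault(item, 0)
--             inventory[item] += 1
--     return inventory
-- ===== SOURCE B (Python) =====
-- def addToInventory(inventory, items):
--     # Rebuild the whole mapping from totals: one pass tallies the items, the
--     # comprehension bumps every existing key by its total at once, then the
--     # dedup pass appends each brand-new key (in first-occurrence order) with
--     # its total; finally write back into inventory (mutated in place, like A).
--     cnt = {}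
--     for x in items:
--         cnt[x] = cnt.get(x, 0) + 1
--     updated = {k: v + cnt.get(k, 0) for k, v in inventory.items()}
--     for x in items:
--         if x not in updated:
--             updated[x] = cnt.get(x, 0)
--     inventory.clear()
--     inventory.update(updated)
--     return inventory
-- ===== Notes on version B (the rewrite author's own statement) =====
-- stated objective: alternative
-- what changed: B replaces A's per-item increment loop with a rebuild from totals: it tallies the items once, bumps every existing key by its total in a dict comprehension, appends each new key with its total in a dedup pass, and writes the result back into inventory.
import Mathlib
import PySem

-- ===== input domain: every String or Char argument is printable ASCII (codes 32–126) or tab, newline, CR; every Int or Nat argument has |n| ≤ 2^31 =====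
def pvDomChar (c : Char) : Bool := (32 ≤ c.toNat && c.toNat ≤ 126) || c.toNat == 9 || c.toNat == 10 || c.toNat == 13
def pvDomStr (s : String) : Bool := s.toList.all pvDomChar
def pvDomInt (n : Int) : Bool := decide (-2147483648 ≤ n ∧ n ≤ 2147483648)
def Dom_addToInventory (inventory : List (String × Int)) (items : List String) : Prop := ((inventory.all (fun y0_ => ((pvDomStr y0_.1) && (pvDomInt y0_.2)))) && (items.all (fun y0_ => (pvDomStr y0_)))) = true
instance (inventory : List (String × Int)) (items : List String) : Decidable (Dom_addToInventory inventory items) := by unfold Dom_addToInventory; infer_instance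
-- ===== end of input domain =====

-- B rebuilds the mapping from counts (bump every existing key by items.count(k),
-- then append each new key with its total count) instead of A's per-item
-- increment loop; both mutate the passed inventory dict to the same final state.

-- ===== PORT A =====
def addToInventory (inventory : List (String × Int)) (items : List String) : List (String × Int) :=
  (items.foldl (fun d item =>
      if d.contains item then
        d.insert item (d.getD item 0 + 1)
      else
        -- inventory.setdefault(item, 0); inventory[item] += 1
        let d' := d.setdefault item 0
        d'.insert item (d'.getD item 0 + 1))
    (PySem.Dict.mk inventory)).items

-- ===== PORT B =====
def addToInventory_alt (inventory : List (String × Int)) (items : List String) : List (String × Int) :=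
  -- cnt = {}; for x in items: cnt[x] = cnt.get(x, 0) + 1
  let cnt : PySem.Dict String Int :=
    items.foldl (fun c x => c.insert x (c.getD x 0 + 1)) PySem.Dict.empty
  -- updated = {k: v + cnt.get(k, 0) for k, v in inventory.items()}
  let updated0 : PySem.Dict String Int :=
    PySem.Dict.mk (inventory.map (fun kv => (kv.1, kv.2 + cnt.getD kv.1 0)))
  -- for x in items: if x not in updated: updated[x] = cnt.get(x, 0)
  let updated :=
    items.foldl (fun e x => if e.contains x then e else e.insert x (cnt.getD x 0)) updated0
  -- inventory.clear(); inventory.update(updated); return inventory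
  updated.items

-- ===== PRECONDITION & SPEC =====
-- Pre_ only requires the inventory association list to have distinct keys; a Python
-- dict argument always satisfies this (dict keys are unique), so no input the Python
-- A accepts is excluded.
def Pre_addToInventory (inventory : List (String × Int)) (items : List String) : Prop :=
  (inventory.map Prod.fst).Nodup
instance (inventory : List (String × Int)) (items : List String) : Decidable (Pre_addToInventory inventory items) := by unfold Pre_addToInventory; infer_instance
def pvWitness_addToInventory : (List (String × Int)) × List String := ([("a", 1)], ["a", "b"])

def Spec_addToInventory (inventory : List (String × Int)) (items : List String) (out : List (String × Int)) : Prop := out = addToInventory_alt inventory items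
instance (inventory : List (String × Int)) (items : List String) (out : List (String × Int)) : Decidable (Spec_addToInventory inventory items out) := by unfold Spec_addToInventory; infer_instance

-- ===== CLAIM (what is proved, stated in full; the proofs are below) =====
def Claim_equal_addToInventory : Prop := ∀ (inventory : List (String × Int)) (items : List String), Dom_addToInventory inventory items → Pre_addToInventory inventory items → Spec_addToInventory inventory items (addToInventory inventory items)

-- ===== LEMMAS AND PROOFS =====

/-- The single-item increment step A's loop body boils down to. -/
def pvStep (d : PySem.Dict String Int) (x : String) : PySem.Dict String Int :=
  d.insert x (d.getD x 0 + 1)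

/-- Bump every present key's value by its count in `its` (B's comprehension). -/
def pvBump (d : PySem.Dict String Int) (its : List String) : PySem.Dict String Int :=
  PySem.Dict.mk (d.items.map (fun kv => (kv.1, kv.2 + (its.count kv.1 : Int))))

/-- B's second pass: append each missing key with its count in `full`. -/
def pvFill (d : PySem.Dict String Int) (its full : List String) : PySem.Dict String Int :=
  its.foldl (fun e x => if e.contains x then e else e.insert x ((full.count x : Int))) d

/-- A's loop body is exactly `pvStep`. -/
theorem pvAstep (d : PySem.Dict String Int) (x : String) :
    (if d.contains x then d.insert x (d.getD x 0 + 1)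
     else
       let d' := d.setdefault x 0
       d'.insert x (d'.getD x 0 + 1)) = pvStep d x := by
  by_cases h : d.contains x
  · simp [h, pvStep]
  · simp only [Bool.not_eq_true] at h
    simp only [h, if_neg Bool.false_ne_true]
    rw [PySem.Dict.setdefault_of_not_contains d 0 h]
    rw [PySem.Dict.getD_insert_self, PySem.Dict.insert_insert_self]
    rw [pvStep, PySem.Dict.getD_of_not_contains d 0 h]

theorem pvBumpKeys (d : PySem.Dict String Int) (its : List String) :
    (pvBump d its).keys = d.keys := by
  simp [pvBump, List.map_map, Function.comp, PySem.Dict.keys]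

theorem pvBumpContains (d : PySem.Dict String Int) (its : List String) (x : String) :
    (pvBump d its).contains x = d.contains x := by
  rw [PySem.Dict.contains_eq_decide_mem_keys, PySem.Dict.contains_eq_decide_mem_keys, pvBumpKeys]

theorem pvFillCons (r : List String) (x : String) (full : List String) :
    ∀ e : PySem.Dict String Int, e.contains x = true →
      pvFill e r (x :: full) = pvFill e r full := by
  induction r with
  | nil => intro e _; rfl
  | cons y r ih =>
    intro e hx
    simp only [pvFill, List.foldl_cons] at *
    by_cases hy : e.contains y
    · simp only [hy, if_pos]
      exact ih e hx
    · simp only [Bool.not_eq_true] at hy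
      have hyx : y ≠ x := by rintro rfl; rw [hx] at hy; exact absurd hy (by simp)
      have hcnt : ((x :: full).count y : Int) = (full.count y : Int) := by
        rw [List.count_cons]
        simp [Ne.symm hyx]
      rw [if_neg (by simp [hy]), if_neg (by simp [hy]), hcnt]
      exact ih _ (by rw [PySem.Dict.contains_insert, hx]; simp)

theorem pvBumpNil (d : PySem.Dict String Int) : pvBump d [] = d := by
  apply PySem.Dict.ext
  show d.items.map (fun kv => (kv.1, kv.2 + (([] : List String).count kv.1 : Int))) = d.items
  simp

theorem pvBumpStepMem (d : PySem.Dict String Int) (x : String) (r : List String)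
    (hnd : d.keys.Nodup) (hc : d.contains x = true) :
    pvBump (pvStep d x) r = pvBump d (x :: r) := by
  apply PySem.Dict.ext
  show ((pvStep d x).items.map (fun kv => (kv.1, kv.2 + (r.count kv.1 : Int))))
      = d.items.map (fun kv => (kv.1, kv.2 + ((x :: r).count kv.1 : Int)))
  rw [pvStep, PySem.Dict.items_insert_of_contains _ _ hc, List.map_map]
  apply List.map_congr_left
  intro p hp
  by_cases hpx : p.1 = x
  · have hmem : (x, p.2) ∈ d.items := by rw [← hpx]; exact hp
    have hget : d.getD x 0 = p.2 := PySem.Dict.getD_of_mem_items d hmem hnd 0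
    have hcnt : (((x :: r).count p.1 : Nat) : Int) = (r.count p.1 : Int) + 1 := by
      rw [List.count_cons]; simp [hpx]
    simp [Function.comp, hpx, hget]
    omega
  · have hcnt : (((x :: r).count p.1 : Nat) : Int) = (r.count p.1 : Int) := by
      rw [List.count_cons]; simp [Ne.symm hpx]
    simp [Function.comp, hpx, hcnt]

theorem pvNotMemFst (d : PySem.Dict String Int) (x : String) (hc : d.contains x = false)
    (p : String × Int) (hp : p ∈ d.items) : p.1 ≠ x := by
  intro h
  have : d.contains x = true := by
    rw [PySem.Dict.contains_iff_mem_keys]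
    rw [← h]
    exact List.mem_map_of_mem hp
  rw [this] at hc; exact absurd hc (by simp)

theorem pvBumpStepNew (d : PySem.Dict String Int) (x : String) (r : List String)
    (hc : d.contains x = false) :
    (pvBump d (x :: r)).insert x (((x :: r).count x : Nat) : Int) = pvBump (pvStep d x) r := by
  have hE : (pvBump d (x :: r)).contains x = false := by rw [pvBumpContains]; exact hc
  apply PySem.Dict.ext
  rw [PySem.Dict.items_insert_of_not_contains _ _ hE]
  show (d.items.map (fun kv => (kv.1, kv.2 + ((x :: r).count kv.1 : Int)))) ++ [(x, (((x :: r).count x : Nat) : Int))]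
      = (pvStep d x).items.map (fun kv => (kv.1, kv.2 + (r.count kv.1 : Int)))
  rw [pvStep, PySem.Dict.items_insert_of_not_contains _ _ hc,
      PySem.Dict.getD_of_not_contains d 0 hc, List.map_append]
  congr 1
  · apply List.map_congr_left
    intro p hp
    have hpx := pvNotMemFst d x hc p hp
    have hcnt : (((x :: r).count p.1 : Nat) : Int) = (r.count p.1 : Int) := by
      rw [List.count_cons]; simp [Ne.symm hpx]
    rw [hcnt]
  · have hcnt : (((x :: r).count x : Nat) : Int) = (r.count x : Int) + 1 := by
      rw [List.count_cons]; simp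
    rw [hcnt]
    simp
    omega

theorem pvLoop (its : List String) :
    ∀ d : PySem.Dict String Int, d.keys.Nodup →
      its.foldl pvStep d = pvFill (pvBump d its) its its := by
  induction its with
  | nil => intro d _; rw [pvBumpNil]; rfl
  | cons x r ih =>
    intro d hnd
    have hnd' : (pvStep d x).keys.Nodup := PySem.Dict.nodup_keys_insert d x _ hnd
    have hstep : (x :: r).foldl pvStep d = r.foldl pvStep (pvStep d x) := rfl
    rw [hstep, ih (pvStep d x) hnd']
    by_cases hc : d.contains x = true
    · have hEc : (pvBump d (x :: r)).contains x = true := by rw [pvBumpContains]; exact hc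
      have h1 : pvFill (pvBump d (x :: r)) (x :: r) (x :: r)
          = pvFill (pvBump d (x :: r)) r (x :: r) := by
        simp only [pvFill, List.foldl_cons, hEc, if_pos]
      rw [h1, pvFillCons r x r _ hEc, pvBumpStepMem d x r hnd hc]
    · simp only [Bool.not_eq_true] at hc
      have hEc : (pvBump d (x :: r)).contains x = false := by rw [pvBumpContains]; exact hc
      have h1 : pvFill (pvBump d (x :: r)) (x :: r) (x :: r)
          = pvFill ((pvBump d (x :: r)).insert x (((x :: r).count x : Nat) : Int)) r (x :: r) := by
        simp only [pvFill, List.foldl_cons, hEc]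
        rw [if_neg (by simp)]
      rw [h1, pvBumpStepNew d x r hc,
          pvFillCons r x r _ (by rw [pvBumpContains, pvStep]; exact PySem.Dict.contains_insert_self d x _)]

/-- B's definition, with the tally fold recognised as `counter` and its lookups
as list counts. -/
theorem pvAltEq (inventory : List (String × Int)) (items : List String) :
    addToInventory_alt inventory items
      = (pvFill (pvBump (PySem.Dict.mk inventory) items) items items).items := by
  unfold addToInventory_alt
  simp only [PySem.Dict.foldl_insert_getD_add_one_eq_counter, PySem.Dict.getD_counter]
  rfl

-- ===== VERDICT (by name: the statement is the Claim_ definition above) =====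
theorem addToInventory_spec : Claim_equal_addToInventory := by
  intro inventory items _ hpre
  unfold Spec_addToInventory addToInventory
  rw [pvAltEq]
  have hfun : (fun (d : PySem.Dict String Int) (item : String) =>
      if d.contains item then d.insert item (d.getD item 0 + 1)
      else
        let d' := d.setdefault item 0
        d'.insert item (d'.getD item 0 + 1)) = pvStep := by
    funext d x; exact pvAstep d x
  rw [hfun]
  have hnd : (PySem.Dict.mk inventory).keys.Nodup := hpre
  rw [pvLoop items (PySem.Dict.mk inventory) hnd]
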